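-- pv_equiv track=rewrite | github.com/Jack-972/Mastermind-Solver | Détails Matermind.py | BestProp
-- ===== SOURCE A (Python) =====
-- def score(S,P):
--    r=0
--    for i in range(4): # Pour chaque trou
--        if S[i]==P[i]: # Si 2 boules ont la même couleur dans le même n° de trou
--            r=r+1      # Ajouter 1 au chiffre des dizaines du score
--    b=-r
--    for j in range(6): # Pour chaque couleur
--        n=0
--        m=0
--        for k in range(4): # Pour chaque trou
--            if S[k]==j:    # Pour le  code secret si la boule d'emplacement k est de couleur j
--                n=n+1      # augmenter le compteur n d'une unité
--            if P[k]==j:    # Pour la  proposition si la boule d'emplacement k est de couleur j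
--                m=m+1      # augmenter le compteur m d'une unité
--        if n<m:            # S'il y a plus de boules de couleur j dans la prop que dans le code
--            b=b+n          # le chiffre des unités est n soustrait au chiffre des dizaines
--        else:              # Sinon
--            b=b+m          # le chiffre des unités est m soustrait au chiffre des dizaines
--    s=10*r+b               # le score est le chiffre des unités additionné au chiffre des dizaines
--    return(s)
--
-- sco=[0,1,2,3,4,10,11,12,13,20,21,22,30,40]
--
-- def BestProp(C): # Renvoie la meilleure proposition pour une liste de candidats donnéee
--     n=0
--     D={}
--     L=[]
--     P=[]
--     for i in range(len(C)): # pour les propositions dans la liste des candidats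
--         for j in sco: # pour les scores dans la listes des scores
--             for k in range(len(C)):  # pour les propositions dans la liste des candidats
--                 if (i,k) not in D: # si le score entre la liste C[i] et C[k] n'est pas dans le dictionnaire
--                     D[(i,k)]=score(C[i],C[k]) # calculer ce score et le stocké dans D
--                     D[(k,i)]=D[(i,k)] # le score étant symétrique, affecter ce score à (k,i)
--                 if D[(i,k)]==j:
--                     n+=1 # compte nb de liste de candidats ayant le même score qu'une liste candidat donnée
--             L.append(n) # faire correspondre à chaque score ce nombre de liste de candidat
--             n=0
--         P.append(max(L)) # score ayant le plus grand nb de solutions est le poids correspondant à un candidat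
--         L=[]
--     ppp=min(P) # prendre le plus petit poids de la liste des candidats
--     for i in range(len(C)):
--         if P[i]==ppp: # correspond au premier candidat qui a le plus petit poids
--             return(C[i]) # renvoyer ce candidat
-- ===== SOURCE B (Python) =====
-- sco=[0,1,2,3,4,10,11,12,13,20,21,22,30,40]
--
-- def score(S,P):  # same scoring rule as the module helper in A
--    r=0
--    for i in range(4):
--        if S[i]==P[i]:
--            r=r+1
--    b=-r
--    for j in range(6):
--        n=0
--        m=0
--        for k in range(4):
--            if S[k]==j:
--                n=n+1
--            if P[k]==j:
--                m=m+1
--        if n<m: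
--            b=b+n
--        else:
--            b=b+m
--    s=10*r+b
--    return(s)
--
-- def BestProp(C):
--     weights=[]
--     for ci in C:
--         cnt={}
--         for ck in C:
--             s=score(ci,ck)
--             cnt[s]=cnt.get(s,0)+1
--         weights.append(max(cnt.get(j,0) for j in sco))
--     best=min(weights)
--     return C[weights.index(best)]
-- ===== Notes on version B (the rewrite author's own statement) =====
-- stated objective: simpler
-- what changed: Per candidate, one histogram pass over C (a dict counting score buckets) with the weight read off as the largest bucket among the 14 possible scores, replacing A's 14 rescans of C per candidate and its symmetric memo dict; first-minimal-weight tie-break kept.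
import Mathlib
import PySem

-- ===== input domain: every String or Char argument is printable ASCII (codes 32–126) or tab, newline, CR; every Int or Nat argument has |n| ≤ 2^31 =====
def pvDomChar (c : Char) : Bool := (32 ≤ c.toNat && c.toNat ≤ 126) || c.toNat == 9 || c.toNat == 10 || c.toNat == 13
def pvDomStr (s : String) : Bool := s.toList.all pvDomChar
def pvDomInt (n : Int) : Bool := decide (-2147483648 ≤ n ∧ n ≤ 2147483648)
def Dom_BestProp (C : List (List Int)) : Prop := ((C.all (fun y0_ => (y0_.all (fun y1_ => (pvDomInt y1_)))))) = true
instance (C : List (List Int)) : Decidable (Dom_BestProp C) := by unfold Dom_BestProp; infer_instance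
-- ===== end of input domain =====

-- B replaces A's triple loop (for each candidate, 14 rescans of C, one per possible score, with a
-- symmetric memo dict) by a single histogram pass per candidate: one score-bucket Counter over C,
-- then the weight is the max bucket size over the possible scores. Same scoring helper, same
-- first-minimal-weight tie-break.

-- ===== PORT A =====
-- shared module helper 'score' (identical source in Source A and Source B)
def score (S P : List Int) : Int :=
  let r : Int := (List.range 4).foldl (fun r i =>
      if S.getD i 0 == P.getD i 0 then r + 1 else r) 0
  let b : Int := (List.range 6).foldl (fun b j =>
      let nm : Int × Int := (List.range 4).foldl (fun nm k =>
          let n := if S.getD k 0 == (j : Int) then nm.1 + 1 else nm.1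
          let m := if P.getD k 0 == (j : Int) then nm.2 + 1 else nm.2
          (n, m)) ((0 : Int), (0 : Int))
      if nm.1 < nm.2 then b + nm.1 else b + nm.2) (-r)
  10 * r + b

-- shared module constant 'sco'
def sco : List Int := [0, 1, 2, 3, 4, 10, 11, 12, 13, 20, 21, 22, 30, 40]

-- body of A's innermost loop over k (the memoised score lookup; D[(i,k)] read back with getD 0,
-- exact because the key is present at that point)
def innerStep (C : List (List Int)) (i : Nat) (j : Int)
    (Dn : PySem.Dict (Nat × Nat) Int × Int) (k : Nat) : PySem.Dict (Nat × Nat) Int × Int :=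
  let D := if Dn.1.contains (i, k) then Dn.1
           else (Dn.1.insert (i, k) (score (C.getD i []) (C.getD k []))).insert (k, i)
                  ((Dn.1.insert (i, k) (score (C.getD i []) (C.getD k []))).getD (i, k) 0)
  (D, if D.getD (i, k) 0 == j then Dn.2 + 1 else Dn.2)

-- body of A's loop over the scores j in sco (n starts at 0 and L.append(n))
def jStep (C : List (List Int)) (i : Nat)
    (DL : PySem.Dict (Nat × Nat) Int × List Int) (j : Int) :
    PySem.Dict (Nat × Nat) Int × List Int :=
  let Dn := (List.range C.length).foldl (innerStep C i j) (DL.1, 0)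
  (Dn.1, DL.2 ++ [Dn.2])

-- body of A's outer loop over the candidates i (L starts at [] and P.append(max(L)))
def iStep (C : List (List Int)) (DP : PySem.Dict (Nat × Nat) Int × List Int) (i : Nat) :
    PySem.Dict (Nat × Nat) Int × List Int :=
  let DL := sco.foldl (jStep C i) (DP.1, [])
  (DL.1, DP.2 ++ [(PySem.List.max? DL.2 (fun x => x)).getD 0])

def BestProp (C : List (List Int)) : List Int :=
  let DP := (List.range C.length).foldl (iStep C) (PySem.Dict.empty, [])
  let P := DP.2
  let ppp := (PySem.List.min? P (fun x => x)).getD 0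
  ((((List.range C.length).find? (fun i => P.getD i 0 == ppp)).map
      (fun i => C.getD i [])).getD [])

-- ===== PORT B =====
def BestProp_alt (C : List (List Int)) : List Int :=
  let weights := C.map (fun ci =>
    let cnt : PySem.Dict Int Int := C.foldl (fun d ck =>
        let s := score ci ck
        d.insert s (d.getD s 0 + 1)) PySem.Dict.empty
    (PySem.List.max? (sco.map (fun j => cnt.getD j 0)) (fun x => x)).getD 0)
  let best := (PySem.List.min? weights (fun x => x)).getD 0
  match PySem.List.index? weights best with
  | some i => C.getD i []
  | none => []

-- ===== PRECONDITION & SPEC =====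
-- Pre_ excludes exactly the inputs on which the Python A raises: an empty candidate list
-- (min of an empty weight list, ValueError) and candidates shorter than 4 (IndexError in score).
def Pre_BestProp (C : List (List Int)) : Prop := C ≠ [] ∧ ∀ row ∈ C, 4 ≤ row.length
instance (C : List (List Int)) : Decidable (Pre_BestProp C) := by unfold Pre_BestProp; infer_instance

def pvWitness_BestProp : List (List Int) := [[0, 1, 2, 3], [1, 1, 2, 2], [5, 5, 5, 5]]

def Spec_BestProp (C : List (List Int)) (out : List Int) : Prop := out = BestProp_alt C
instance (C : List (List Int)) (out : List Int) : Decidable (Spec_BestProp C out) := by unfold Spec_BestProp; infer_instance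

-- ===== CLAIM (what is proved, stated in full; the proofs are below) =====
def Claim_equal_BestProp : Prop := ∀ (C : List (List Int)), Dom_BestProp C → Pre_BestProp C → Spec_BestProp C (BestProp C)

-- ===== LEMMAS AND PROOFS =====

-- the score function is symmetric in its two arguments
lemma score_symm (S P : List Int) : score S P = score P S := by
  have hr : (List.range 4).foldl (fun r i => if S.getD i 0 == P.getD i 0 then r + 1 else r) (0:Int)
      = (List.range 4).foldl (fun r i => if P.getD i 0 == S.getD i 0 then r + 1 else r) (0:Int) := by
    apply PySem.List.foldl_congr_mem
    intro acc x _
    rw [Bool.beq_comm]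
  have hb : ∀ init : Int,
      (List.range 6).foldl (fun b j =>
        let nm : Int × Int := (List.range 4).foldl (fun nm k =>
            (if S.getD k 0 == (j : Int) then nm.1 + 1 else nm.1,
             if P.getD k 0 == (j : Int) then nm.2 + 1 else nm.2)) ((0 : Int), (0 : Int))
        if nm.1 < nm.2 then b + nm.1 else b + nm.2) init
      = (List.range 6).foldl (fun b j =>
        let nm : Int × Int := (List.range 4).foldl (fun nm k =>
            (if P.getD k 0 == (j : Int) then nm.1 + 1 else nm.1,
             if S.getD k 0 == (j : Int) then nm.2 + 1 else nm.2)) ((0 : Int), (0 : Int))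
        if nm.1 < nm.2 then b + nm.1 else b + nm.2) init := by
    intro init
    apply PySem.List.foldl_congr_mem
    intro acc j _
    simp only
    rw [PySem.List.foldl_prod_mk (f := fun a k => if S.getD k 0 == (j:Int) then a + 1 else a)
          (g := fun a k => if P.getD k 0 == (j:Int) then a + 1 else a),
        PySem.List.foldl_prod_mk (f := fun a k => if P.getD k 0 == (j:Int) then a + 1 else a)
          (g := fun a k => if S.getD k 0 == (j:Int) then a + 1 else a)]
    split_ifs <;> omega
  simp only [score]
  rw [hr, hb]

-- the number of k < C.length with score C[i] C[k] = j, as A counts it by index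
def cnt (C : List (List Int)) (ci : List Int) (j : Int) : Int :=
  (C.countP (fun ck => score ci ck == j) : Int)

-- a candidate's weight: the largest score-bucket size
def weight (C : List (List Int)) (ci : List Int) : Int :=
  (PySem.List.max? (sco.map (fun j => cnt C ci j)) (fun x => x)).getD 0

-- invariant of A's memo dict: every stored value is the score of the indexed pair
def MemoInv (C : List (List Int)) (D : PySem.Dict (Nat × Nat) Int) : Prop :=
  ∀ a b v, D.get? (a, b) = some v → v = score (C.getD a []) (C.getD b [])

lemma innerStep_D (C : List (List Int)) (i : Nat) (j : Int)
    (D : PySem.Dict (Nat × Nat) Int) (n : Int) (k : Nat) (h : MemoInv C D) :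
    MemoInv C (innerStep C i j (D, n) k).1 ∧
    (innerStep C i j (D, n) k).1.getD (i, k) 0 = score (C.getD i []) (C.getD k []) := by
  simp only [innerStep]
  by_cases hc : D.contains (i, k)
  · simp only [hc, if_true]
    refine ⟨h, ?_⟩
    have := PySem.Dict.contains_eq_isSome_get? (d := D) (k := (i, k))
    rw [hc] at this
    obtain ⟨v, hv⟩ := Option.isSome_iff_exists.mp this.symm
    rw [PySem.Dict.getD_eq_get?_getD, hv, Option.getD_some]
    exact h i k v hv
  · simp only [hc, Bool.false_eq_true, if_false, PySem.Dict.getD_insert_self]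
    constructor
    · intro a b v hv
      rw [PySem.Dict.get?_insert] at hv
      split at hv
      · rename_i heq
        cases hv
        have : a = k ∧ b = i := by simpa [Prod.ext_iff] using heq
        rw [this.1, this.2, score_symm]
      · rw [PySem.Dict.get?_insert] at hv
        split at hv
        · rename_i heq
          cases hv
          have : a = i ∧ b = k := by simpa [Prod.ext_iff] using heq
          rw [this.1, this.2]
        · exact h a b v hv
    · rw [PySem.Dict.getD_insert]
      split
      · rename_i heq
        have : i = k := by simp [Prod.ext_iff] at heq; omega
        subst this
        rfl
      · rw [PySem.Dict.getD_insert_self]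

lemma innerStep_snd (C : List (List Int)) (i : Nat) (j : Int)
    (D : PySem.Dict (Nat × Nat) Int) (n : Int) (k : Nat) (h : MemoInv C D) :
    (innerStep C i j (D, n) k).2 =
      if score (C.getD i []) (C.getD k []) == j then n + 1 else n := by
  have hD := (innerStep_D C i j D n k h).2
  simp only [innerStep] at hD ⊢
  rw [hD]

lemma innerFold (C : List (List Int)) (i : Nat) (j : Int) (ks : List Nat) :
    ∀ (D : PySem.Dict (Nat × Nat) Int) (n : Int), MemoInv C D →
    (ks.foldl (innerStep C i j) (D, n)).2
        = n + (ks.countP (fun k => score (C.getD i []) (C.getD k []) == j) : Int)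
      ∧ MemoInv C (ks.foldl (innerStep C i j) (D, n)).1 := by
  induction ks with
  | nil => intro D n h; simpa using h
  | cons k ks ih =>
    intro D n h
    rw [List.foldl_cons]
    have hpair : innerStep C i j (D, n) k
        = ((innerStep C i j (D, n) k).1, (innerStep C i j (D, n) k).2) := rfl
    rw [hpair, innerStep_snd C i j D n k h]
    obtain ⟨h1, h2⟩ := ih (innerStep C i j (D, n) k).1 _ (innerStep_D C i j D n k h).1
    refine ⟨?_, h2⟩
    rw [h1, List.countP_cons]
    by_cases hp : (score (C.getD i []) (C.getD k []) == j) = true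
    · simp only [hp, if_true]; push_cast; ring
    · have hp' : (score (C.getD i []) (C.getD k []) == j) = false := by simpa using hp
      simp only [hp', Bool.false_eq_true, if_false]
      push_cast; ring

lemma find_range_eq_idxOf? (P : List Int) (v : Int) :
    (List.range P.length).find? (fun i => P.getD i 0 == v) = P.idxOf? v := by
  induction P with
  | nil => simp
  | cons h t ih =>
    rw [List.length_cons, List.range_succ_eq_map, List.find?_cons, List.idxOf?_cons]
    by_cases hv : (h == v) = true
    · simp [hv]
    · have hv' : (h == v) = false := by simpa using hv
      simp only [List.getD_cons_zero, hv', Bool.false_eq_true, if_false, List.find?_map]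
      rw [← ih]
      congr 1


lemma map_range_getD (C : List (List Int)) :
    (List.range C.length).map (fun k => C.getD k ([] : List Int)) = C := by
  apply List.ext_getElem (by simp)
  intro k h1 h2
  simp [List.getD_eq_getElem?_getD, List.getElem?_eq_getElem h2]


lemma countP_range_getD (C : List (List Int)) (p : List Int → Bool) :
    (List.range C.length).countP (fun k => p (C.getD k [])) = C.countP p := by
  conv_rhs => rw [← map_range_getD C]
  rw [List.countP_map]
  rfl

lemma jFold (C : List (List Int)) (i : Nat) (js : List Int) :
    ∀ (D : PySem.Dict (Nat × Nat) Int) (L : List Int), MemoInv C D →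
    (js.foldl (jStep C i) (D, L)).2 = L ++ js.map (fun j => cnt C (C.getD i []) j)
      ∧ MemoInv C (js.foldl (jStep C i) (D, L)).1 := by
  induction js with
  | nil => intro D L h; simpa using h
  | cons j js ih =>
    intro D L h
    rw [List.foldl_cons]
    have hin := innerFold C i j (List.range C.length) D 0 h
    have hpair : jStep C i (D, L) j
        = (((List.range C.length).foldl (innerStep C i j) (D, 0)).1,
           L ++ [((List.range C.length).foldl (innerStep C i j) (D, 0)).2]) := rfl
    rw [hpair]
    obtain ⟨h1, h2⟩ := ih _ _ hin.2
    refine ⟨?_, h2⟩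
    rw [h1, hin.1, zero_add, List.map_cons]
    have hc : (((List.range C.length).countP
          (fun k => score (C.getD i []) (C.getD k []) == j)) : Int)
        = cnt C (C.getD i []) j := by
      unfold cnt
      rw [countP_range_getD C (fun ck => score (C.getD i []) ck == j)]
    rw [hc, List.append_assoc, List.singleton_append]

lemma iFold (C : List (List Int)) (is : List Nat) :
    ∀ (D : PySem.Dict (Nat × Nat) Int) (P : List Int), MemoInv C D →
    (is.foldl (iStep C) (D, P)).2 = P ++ is.map (fun i => weight C (C.getD i []))
      ∧ MemoInv C (is.foldl (iStep C) (D, P)).1 := by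
  induction is with
  | nil => intro D P h; simpa using h
  | cons i is ih =>
    intro D P h
    rw [List.foldl_cons]
    have hj := jFold C i sco D [] h
    have hpair : iStep C (D, P) i
        = ((sco.foldl (jStep C i) (D, [])).1,
           P ++ [(PySem.List.max? (sco.foldl (jStep C i) (D, [])).2 (fun x => x)).getD 0]) := rfl
    rw [hpair]
    obtain ⟨h1, h2⟩ := ih _ _ hj.2
    refine ⟨?_, h2⟩
    rw [h1, hj.1, List.nil_append, List.map_cons]
    show P ++ [weight C (C.getD i [])] ++ _ = _
    rw [List.append_assoc, List.singleton_append]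

-- B's per-candidate Counter lookup is the bucket count
lemma alt_weights (C : List (List Int)) (ci : List Int) :
    (PySem.List.max? (sco.map (fun j =>
        (C.foldl (fun d ck => let s := score ci ck; d.insert s (d.getD s 0 + 1))
          PySem.Dict.empty).getD j 0)) (fun x => x)).getD 0 = weight C ci := by
  unfold weight
  have hcnt : ∀ j : Int,
      (C.foldl (fun d ck => let s := score ci ck; d.insert s (d.getD s 0 + 1))
        (PySem.Dict.empty : PySem.Dict Int Int)).getD j 0 = cnt C ci j := by
    intro j
    have hm : (C.map (score ci)).foldl
        (fun (d : PySem.Dict Int Int) x => d.insert x (d.getD x 0 + 1)) PySem.Dict.empty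
        = C.foldl (fun d ck => let s := score ci ck; d.insert s (d.getD s 0 + 1))
            PySem.Dict.empty := by
      rw [List.foldl_map]
    rw [← hm, PySem.Dict.getD_foldl_insert_add_one, PySem.Dict.getD_empty, zero_add]
    unfold cnt
    rw [List.count_eq_countP, List.countP_map]
    rfl
  simp only [hcnt]

-- A's final first-match index scan equals B's list.index on the same weight list
lemma select_eq (P : List Int) (C : List (List Int)) (hlen : P.length = C.length) (v : Int) :
    ((((List.range C.length).find? (fun i => P.getD i 0 == v)).map
        (fun i => C.getD i [])).getD []) =
      (match PySem.List.index? P v with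
       | some i => C.getD i []
       | none => ([] : List Int)) := by
  rw [PySem.List.index?_eq_idxOf?, ← hlen, find_range_eq_idxOf?]
  cases P.idxOf? v <;> simp

lemma ports_eq (C : List (List Int)) : BestProp C = BestProp_alt C := by
  have hinv : MemoInv C PySem.Dict.empty := by
    intro a b v hv
    rw [PySem.Dict.get?_empty] at hv
    cases hv
  have hfold := iFold C (List.range C.length) PySem.Dict.empty [] hinv
  have hmap : (List.range C.length).map (fun i => weight C (C.getD i []))
      = C.map (weight C) := by
    calc (List.range C.length).map (fun i => weight C (C.getD i []))
        = ((List.range C.length).map (fun k => C.getD k ([] : List Int))).map (weight C) := by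
          rw [List.map_map]; rfl
      _ = C.map (weight C) := by rw [map_range_getD]
  have hw : (C.map (fun ci =>
      let cnt : PySem.Dict Int Int := C.foldl (fun d ck =>
          let s := score ci ck
          d.insert s (d.getD s 0 + 1)) PySem.Dict.empty
      (PySem.List.max? (sco.map (fun j => cnt.getD j 0)) (fun x => x)).getD 0))
      = C.map (weight C) := by
    apply List.map_congr_left
    intro ci _
    exact alt_weights C ci
  simp only [BestProp, BestProp_alt]
  rw [hfold.1, List.nil_append, hmap, hw]
  exact select_eq (C.map (weight C)) C (by simp) _

-- ===== VERDICT (by name: the statement is the Claim_ definition above) =====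
theorem BestProp_spec : Claim_equal_BestProp := by
  intro C _ _
  show BestProp C = BestProp_alt C
  exact ports_eq C
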